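-- pv_equiv track=rewrite | github.com/ThisIsMyAccountName/INF273 | bruteforce.py | insert_number_at_all_positions
-- ===== SOURCE A (Python) =====
-- def insert_number_at_all_positions(original_list, number_to_insert):
--     result_list = []
--
--     for i in range(len(original_list) + 1):  # Range adjusted for the first insertion
--         for j in range(i + 1, len(original_list) + 2):  # Range adjusted for the second insertion
--             new_list = original_list.copy()
--             new_list.insert(i, number_to_insert)
--             new_list.insert(j, number_to_insert)
--             result_list.append(new_list)
--
--     return result_list
-- ===== SOURCE B (Python) =====
-- def insert_number_at_all_positions(original_list, number_to_insert):
--     x = number_to_insert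
--
--     def singles(l):
--         # all lists with x inserted at one position of l, front-most first
--         res = []
--         prefix = []
--         rest = l
--         while True:
--             res.append(prefix + [x] + rest)
--             if not rest:
--                 return res
--             prefix = prefix + [rest[0]]
--             rest = rest[1:]
--
--     def rec(prefix, rest):
--         # all full results whose first insertion lies inside rest (after prefix)
--         block = [prefix + [x] + s for s in singles(rest)]
--         if not rest:
--             return block
--         return block + rec(prefix + [rest[0]], rest[1:])
--
--     return rec([], original_list)
-- ===== Notes on version B (the rewrite author's own statement) =====
-- stated objective: alternative
-- what changed: A enumerates position pairs with nested index loops and builds each output by copying the list and calling list.insert twice; B uses structural recursion on the list with no indices: a recursive helper producing all single insertions and a second recursion that prepends x before each single insertion (first-position-0 block) and prepends the head before each recursive double insertion of the tail, yielding the same lexicographic order.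
import Mathlib
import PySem

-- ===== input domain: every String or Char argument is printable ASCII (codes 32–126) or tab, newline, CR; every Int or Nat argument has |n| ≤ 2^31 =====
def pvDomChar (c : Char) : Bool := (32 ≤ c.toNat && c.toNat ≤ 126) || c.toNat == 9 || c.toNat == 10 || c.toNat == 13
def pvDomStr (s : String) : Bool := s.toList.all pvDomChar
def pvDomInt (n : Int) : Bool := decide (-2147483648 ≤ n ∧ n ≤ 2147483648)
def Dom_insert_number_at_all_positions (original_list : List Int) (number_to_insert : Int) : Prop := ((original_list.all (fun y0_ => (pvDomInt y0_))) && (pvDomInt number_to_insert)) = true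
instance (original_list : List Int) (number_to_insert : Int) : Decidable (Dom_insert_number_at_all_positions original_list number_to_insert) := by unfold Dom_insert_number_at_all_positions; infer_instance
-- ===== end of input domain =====

-- B replaces A's index-driven nested loops (copy + two list.insert per pair) by index-free
-- structural recursion over the list carrying a prefix accumulator; objective: alternative.

-- ===== PORT A =====
-- nested for-loops over range, each body copying the list and calling list.insert twice
def insert_number_at_all_positions (original_list : List Int) (number_to_insert : Int) : List (List Int) :=
  (PySem.List.pyRange 0 ((original_list.length : Int) + 1) 1).foldl (fun result_list i =>
    (PySem.List.pyRange (i + 1) ((original_list.length : Int) + 2) 1).foldl (fun result_list j =>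
      result_list ++ [PySem.List.insert (PySem.List.insert original_list i number_to_insert) j number_to_insert])
      result_list) []

-- ===== PORT B =====
-- B's `singles` while-loop: state (res, prefix, rest); structural recursion on rest
def pvSinglesLoop (x : Int) (res : List (List Int)) (pre : List Int) : List Int → List (List Int)
  | [] => res ++ [pre ++ [x]]
  | h :: t => pvSinglesLoop x (res ++ [pre ++ [x] ++ (h :: t)]) (pre ++ [h]) t

-- B's `rec`: block of results whose first insertion is right after prefix, then recurse
def pvRec (x : Int) (pre : List Int) : List Int → List (List Int)
  | [] => (pvSinglesLoop x [] [] []).map (fun s => pre ++ [x] ++ s)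
  | h :: t => (pvSinglesLoop x [] [] (h :: t)).map (fun s => pre ++ [x] ++ s)
      ++ pvRec x (pre ++ [h]) t

def insert_number_at_all_positions_alt (original_list : List Int) (number_to_insert : Int) : List (List Int) :=
  pvRec number_to_insert [] original_list

-- ===== PRECONDITION & SPEC =====
def Spec_insert_number_at_all_positions (original_list : List Int) (number_to_insert : Int) (out : List (List Int)) : Prop := out = insert_number_at_all_positions_alt original_list number_to_insert
instance (original_list : List Int) (number_to_insert : Int) (out : List (List Int)) : Decidable (Spec_insert_number_at_all_positions original_list number_to_insert out) := by unfold Spec_insert_number_at_all_positions; infer_instance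

-- ===== CLAIM (what is proved, stated in full; the proofs are below) =====
def Claim_equal_insert_number_at_all_positions : Prop := ∀ (original_list : List Int) (number_to_insert : Int), Dom_insert_number_at_all_positions original_list number_to_insert → Spec_insert_number_at_all_positions original_list number_to_insert (insert_number_at_all_positions original_list number_to_insert)

-- ===== LEMMAS AND PROOFS =====

-- accumulator-free characterization of B's two recursions (proof helpers)
def pvSingles (x : Int) : List Int → List (List Int)
  | [] => [[x]]
  | h :: t => (x :: h :: t) :: (pvSingles x t).map (fun s => h :: s)

def pvDoubles (x : Int) : List Int → List (List Int)
  | [] => [[x, x]]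
  | h :: t => (pvSingles x (h :: t)).map (fun s => x :: s) ++ (pvDoubles x t).map (fun d => h :: d)

-- index characterization shared with A's proof: entry (i, k) is
-- take i ++ x :: ((drop i).take k ++ x :: drop (i+k))
def pvG (x : Int) (l : List Int) : List (List Int) :=
  (List.range (l.length + 1)).flatMap (fun i =>
    (List.range (l.length + 1 - i)).map (fun k =>
      l.take i ++ x :: ((l.drop i).take k ++ x :: l.drop (i + k))))

lemma singlesLoop_eq (x : Int) (l : List Int) (res : List (List Int)) (p : List Int) :
    pvSinglesLoop x res p l = res ++ (pvSingles x l).map (fun s => p ++ s) := by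
  induction l generalizing res p with
  | nil => simp [pvSinglesLoop, pvSingles]
  | cons h t ih =>
    rw [pvSinglesLoop, ih, pvSingles]
    simp [List.map_map, Function.comp_def]

lemma rec_eq (x : Int) (l : List Int) (p : List Int) :
    pvRec x p l = (pvDoubles x l).map (fun d => p ++ d) := by
  induction l generalizing p with
  | nil => simp [pvRec, pvDoubles, singlesLoop_eq, pvSingles]
  | cons h t ih =>
    rw [pvRec, ih, pvDoubles, singlesLoop_eq]
    simp [List.map_map, Function.comp_def]

-- A's double list.insert equals the three-piece take/drop assembly, pointwise
lemma double_insert_eq_slices (l : List Int) (x : Int) (i k : Nat)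
    (hi : i ≤ l.length) (hk : i + k ≤ l.length) :
    PySem.List.insert (PySem.List.insert l (i : Int) x) ((i : Int) + 1 + (k : Int)) x
      = l.take i ++ x :: ((l.drop i).take k ++ x :: l.drop (i + k)) := by
  rw [PySem.List.insert_natCast l i x hi]
  have hcast : ((i:Int)+1+(k:Int)) = ((i+1+k : Nat):Int) := by push_cast; ring
  have hlen : i + 1 + k ≤ (l.take i ++ x :: l.drop i).length := by
    simp; omega
  rw [hcast, PySem.List.insert_natCast _ _ _ hlen]
  rw [List.take_append, List.drop_append]
  have hti : (l.take i).length = i := by simp; omega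
  rw [hti]
  have h1 : i + 1 + k - i = k + 1 := by omega
  rw [h1, List.take_of_length_le (by omega : (l.take i).length ≤ i + 1 + k)]
  simp [List.take_succ_cons, List.drop_succ_cons, List.drop_drop]
  omega

lemma a_eq_pvG (l : List Int) (x : Int) :
    insert_number_at_all_positions l x = pvG x l := by
  unfold insert_number_at_all_positions pvG
  simp only [PySem.List.foldl_append_singleton_eq_map]
  rw [PySem.List.foldl_append_eq_flatMap]
  rw [PySem.List.pyRange_one 0 ((l.length : Int) + 1)]
  have h0 : (((l.length : Int) + 1 - 0)).toNat = l.length + 1 := by omega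
  rw [h0, List.flatMap_map, List.nil_append]
  apply List.flatMap_congr
  intro i hi
  rw [List.mem_range] at hi
  rw [PySem.List.pyRange_one]
  have h1 : (((l.length : Int) + 2 - (0 + (i:Int) + 1))).toNat = l.length + 1 - i := by omega
  rw [h1, List.map_map]
  apply List.map_congr_left
  intro k hk
  rw [List.mem_range] at hk
  have hik : i + k ≤ l.length := by omega
  have hcast : (0 + (i:Int)) + 1 + (k:Int) = (i:Int) + 1 + (k:Int) := by ring
  have hcast2 : (0 + (i:Int)) = (i:Int) := by ring
  simp only [Function.comp_apply]
  rw [hcast, hcast2]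
  exact double_insert_eq_slices l x i k (by omega) hik

lemma singles_eq (x : Int) (l : List Int) :
    pvSingles x l = (List.range (l.length + 1)).map (fun k => l.take k ++ x :: l.drop k) := by
  induction l with
  | nil => simp [pvSingles]
  | cons h t ih =>
    rw [List.range_succ_eq_map]
    simp only [List.map_cons, List.map_map]
    rw [pvSingles, ih, List.map_map]
    simp [Function.comp, Nat.succ_eq_add_one]

lemma doubles_eq_pvG (x : Int) (l : List Int) : pvDoubles x l = pvG x l := by
  induction l with
  | nil => simp [pvDoubles, pvG, List.range_succ]
  | cons h t ih =>
    unfold pvG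
    rw [List.range_succ_eq_map, List.flatMap_cons, List.flatMap_map]
    rw [pvDoubles, ih, singles_eq]
    congr 1
    · rw [List.map_map]
      simp [Function.comp]
    · unfold pvG
      rw [List.map_flatMap]
      apply List.flatMap_congr
      intro i hi
      rw [List.mem_range] at hi
      rw [List.map_map]
      simp only [Nat.succ_eq_add_one]
      simp only [List.length_cons, Nat.succ_sub_succ]
      apply List.map_congr_left
      intro k hk
      rw [List.mem_range] at hk
      simp [List.take_succ_cons, List.drop_succ_cons, Nat.add_right_comm]

-- ===== VERDICT (by name: the statement is the Claim_ definition above) =====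
theorem insert_number_at_all_positions_spec : Claim_equal_insert_number_at_all_positions := by
  intro l x _
  unfold Spec_insert_number_at_all_positions insert_number_at_all_positions_alt
  rw [a_eq_pvG, rec_eq, doubles_eq_pvG]
  simp
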